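-- pv_equiv track=rewrite | github.com/xiaotaonotrouble/GUI-based-Color-flipping-Game | A2_FE_121090811.py.py | check_board_coordinates
-- ===== SOURCE A (Python) =====
-- def check_board_coordinates(x, y):
--     flag = False
--     symbol = False
--     for i in range(5):
--         if -175 + 65 * i <= x <= -115 + 65 * i:
--             flag = True
--     for j in range(5):
--         if 220 - 65 * j <= y <= 280 - 65 * j:
--             symbol = True
--     return flag and symbol
-- ===== SOURCE B (Python) =====
-- def check_board_coordinates(x, y):
--     u = x + 175
--     v = 280 - y
--     return 0 <= u <= 320 and u % 65 <= 60 and 0 <= v <= 320 and v % 65 <= 60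
-- ===== Notes on version B (the rewrite author's own statement) =====
-- stated objective: simpler
-- what changed: Replaced the two 5-iteration loops over grid cells with a closed-form modular-arithmetic membership test (u = x+175, v = 280-y; inside iff 0<=u<=320 and u%65<=60, same for v).
import Mathlib
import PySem

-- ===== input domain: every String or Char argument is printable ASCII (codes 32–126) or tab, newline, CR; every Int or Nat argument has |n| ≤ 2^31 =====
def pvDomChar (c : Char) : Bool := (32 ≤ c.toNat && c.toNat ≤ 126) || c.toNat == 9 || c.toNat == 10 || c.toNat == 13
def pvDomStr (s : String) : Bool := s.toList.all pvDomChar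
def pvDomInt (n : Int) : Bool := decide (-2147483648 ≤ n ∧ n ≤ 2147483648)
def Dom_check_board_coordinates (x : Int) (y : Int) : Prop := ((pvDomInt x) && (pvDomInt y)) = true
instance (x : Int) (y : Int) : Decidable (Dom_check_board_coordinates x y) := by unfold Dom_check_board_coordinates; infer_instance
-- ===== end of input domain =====

-- B replaces A's two 5-iteration loops with a closed-form modular-arithmetic test (simpler).

-- ===== PORT A =====
def check_board_coordinates (x : Int) (y : Int) : Bool :=
  let flag := (PySem.List.pyRange 0 5 1).foldl
    (fun flag i => if -175 + 65 * i ≤ x ∧ x ≤ -115 + 65 * i then true else flag) false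
  let symbol := (PySem.List.pyRange 0 5 1).foldl
    (fun symbol j => if 220 - 65 * j ≤ y ∧ y ≤ 280 - 65 * j then true else symbol) false
  flag && symbol

-- ===== PORT B =====
def check_board_coordinates_alt (x : Int) (y : Int) : Bool :=
  let u := x + 175
  let v := 280 - y
  decide (0 ≤ u ∧ u ≤ 320 ∧ PySem.Int.mod u 65 ≤ 60 ∧ 0 ≤ v ∧ v ≤ 320 ∧ PySem.Int.mod v 65 ≤ 60)

-- ===== PRECONDITION & SPEC =====
def Spec_check_board_coordinates (x : Int) (y : Int) (out : Bool) : Prop := out = check_board_coordinates_alt x y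
instance (x : Int) (y : Int) (out : Bool) : Decidable (Spec_check_board_coordinates x y out) := by unfold Spec_check_board_coordinates; infer_instance

-- ===== CLAIM (what is proved, stated in full; the proofs are below) =====
def Claim_equal_check_board_coordinates : Prop := ∀ (x : Int) (y : Int), Dom_check_board_coordinates x y → Spec_check_board_coordinates x y (check_board_coordinates x y)

-- ===== LEMMAS AND PROOFS =====

-- ===== VERDICT (by name: the statement is the Claim_ definition above) =====
theorem check_board_coordinates_spec : Claim_equal_check_board_coordinates := by
  intro x y _
  unfold Spec_check_board_coordinates check_board_coordinates check_board_coordinates_alt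
  have h : PySem.List.pyRange 0 5 1 = [0, 1, 2, 3, 4] := by decide
  rw [h]
  simp only [List.foldl, PySem.Int.mod]
  rw [Bool.eq_iff_iff]
  simp only [Bool.and_eq_true, decide_eq_true_eq, Bool.false_eq_true, imp_false, not_not, apply_ite (· = true), if_true_left]
  rw [Int.fmod_eq_emod, Int.fmod_eq_emod] <;> omega
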